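-- pv_equiv track=rewrite | github.com/mr-holodok/MyKNUCryptoLabs | CryptoLab2/CryptoLab2.py | EncodeTableRoutePermutation
-- ===== SOURCE A (Python) =====
-- def EncodeTableRoutePermutation(msg: str, tableWidth: int) -> str:
--     mod = len(msg) % tableWidth
--     if mod != 0:
--         msg += (tableWidth - mod) * '*'
--     encoded = list(msg)
--     ind = 0
--     for i in range(0, tableWidth):
--         for j in range(0, len(encoded) // tableWidth):
--             encoded[ind] = msg[i + j * tableWidth]
--             ind += 1
--     encodedStr = str()
--     for i in range(0, len(encoded)):
--         encodedStr += encoded[i]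
--     return encodedStr
-- ===== SOURCE B (Python) =====
-- def EncodeTableRoutePermutation(msg: str, tableWidth: int) -> str:
--     mod = len(msg) % tableWidth
--     if mod != 0:
--         msg += (tableWidth - mod) * '*'
--     return ''.join(msg[i::tableWidth] for i in range(tableWidth))
-- ===== Notes on version B (the rewrite author's own statement) =====
-- stated objective: idiomatic
-- what changed: Replaces the explicit table-index double loop with in-place list assignment and the char-by-char concatenation loop by one join over strided column slices msg[i::tableWidth].
-- outside the precondition, e.g. on EncodeTableRoutePermutation('ab', -2): A returns 'ab', B returns ''
import Mathlib
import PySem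

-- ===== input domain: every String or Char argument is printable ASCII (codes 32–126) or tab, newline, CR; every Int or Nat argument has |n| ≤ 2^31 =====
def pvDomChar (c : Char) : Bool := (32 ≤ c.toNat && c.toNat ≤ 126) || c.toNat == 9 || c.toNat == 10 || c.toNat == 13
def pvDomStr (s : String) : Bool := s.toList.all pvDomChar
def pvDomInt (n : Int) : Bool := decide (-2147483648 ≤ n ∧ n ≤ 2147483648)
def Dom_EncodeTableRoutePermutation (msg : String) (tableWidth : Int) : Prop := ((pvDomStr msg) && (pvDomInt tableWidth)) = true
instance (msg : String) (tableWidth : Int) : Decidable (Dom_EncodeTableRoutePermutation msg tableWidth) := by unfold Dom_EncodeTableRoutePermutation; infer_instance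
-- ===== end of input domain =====

-- B replaces A's explicit table-index double loop (in-place list assignment, then a char-by-char
-- concatenation loop) by one join of the strided column slices msg[i::tableWidth]; idiomatic, same cost.

-- ===== PORT A =====
def EncodeTableRoutePermutation (msg : String) (tableWidth : Int) : String :=
  let s0 := msg.toList
  let m := PySem.Int.mod (s0.length : Int) tableWidth
  let msg' := if m ≠ 0 then s0 ++ PySem.List.pyRepeat ['*'] (tableWidth - m) else s0
  -- encoded = list(msg); nested write loop with the running index ind
  let st := (PySem.List.pyRange 0 tableWidth).foldl
    (fun (st : List Char × Int) i =>
      (PySem.List.pyRange 0 (PySem.Int.floordiv (st.1.length : Int) tableWidth)).foldl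
        (fun (st : List Char × Int) j =>
          (PySem.List.pySetD st.1 st.2 (PySem.List.pyGetD msg' (i + j * tableWidth) '*'), st.2 + 1))
        st)
    (msg', 0)
  -- encodedStr: character-by-character concatenation loop
  String.ofList ((PySem.List.pyRange 0 (st.1.length : Int)).foldl
    (fun acc i => acc ++ [PySem.List.pyGetD st.1 i '*']) [])

-- ===== PORT B =====
def EncodeTableRoutePermutation_alt (msg : String) (tableWidth : Int) : String :=
  let s0 := msg.toList
  let m := PySem.Int.mod (s0.length : Int) tableWidth
  let msg' := if m ≠ 0 then s0 ++ PySem.List.pyRepeat ['*'] (tableWidth - m) else s0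
  -- ''.join(msg[i::tableWidth] for i in range(tableWidth))
  String.ofList (((PySem.List.pyRange 0 tableWidth).map
    (fun i => (PySem.List.slice? msg' (some i) none tableWidth).getD [])).flatten)

-- ===== PRECONDITION & SPEC =====
-- Pre_ excludes non-positive widths: tableWidth = 0 raises ZeroDivisionError in A, and a negative
-- width is a degenerate corner outside the cipher's natural domain where A accidentally returns the
-- message unchanged (all its loops are empty) while B naturally returns '' — neither value is specified.
def Pre_EncodeTableRoutePermutation (msg : String) (tableWidth : Int) : Prop := 1 ≤ tableWidth
instance (msg : String) (tableWidth : Int) : Decidable (Pre_EncodeTableRoutePermutation msg tableWidth) := by unfold Pre_EncodeTableRoutePermutation; infer_instance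
def pvWitness_EncodeTableRoutePermutation : String × Int := ("abcde", 3)

def Spec_EncodeTableRoutePermutation (msg : String) (tableWidth : Int) (out : String) : Prop := out = EncodeTableRoutePermutation_alt msg tableWidth
instance (msg : String) (tableWidth : Int) (out : String) : Decidable (Spec_EncodeTableRoutePermutation msg tableWidth out) := by unfold Spec_EncodeTableRoutePermutation; infer_instance

-- ===== CLAIM (what is proved, stated in full; the proofs are below) =====
def Claim_equal_EncodeTableRoutePermutation : Prop := ∀ (msg : String) (tableWidth : Int), Dom_EncodeTableRoutePermutation msg tableWidth → Pre_EncodeTableRoutePermutation msg tableWidth → Spec_EncodeTableRoutePermutation msg tableWidth (EncodeTableRoutePermutation msg tableWidth)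

-- ===== LEMMAS AND PROOFS =====

theorem length_pySetD {α : Type} (xs : List α) (i : Int) (v : α) :
    (PySem.List.pySetD xs i v).length = xs.length := by
  unfold PySem.List.pySetD PySem.List.pySet?
  cases PySem.List.pyIdx? xs.length i <;> simp

/-- Writing the characters `vs` one after another starting at position `k`
    (the effect of A's `encoded[ind] = …; ind += 1` loop body). -/
def pvWriteSeq (enc : List Char) (k : Int) (vs : List Char) : List Char :=
  match vs with
  | [] => enc
  | v :: vs => pvWriteSeq (PySem.List.pySetD enc k v) (k + 1) vs

theorem length_pvWriteSeq (vs : List Char) (enc : List Char) (k : Int) :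
    (pvWriteSeq enc k vs).length = enc.length := by
  induction vs generalizing enc k with
  | nil => rfl
  | cons v vs ih => rw [pvWriteSeq, ih, length_pySetD]

theorem pvWriteSeq_append (u v : List Char) (enc : List Char) (k : Int) :
    pvWriteSeq enc k (u ++ v) = pvWriteSeq (pvWriteSeq enc k u) (k + u.length) v := by
  induction u generalizing enc k with
  | nil => simp [pvWriteSeq]
  | cons a u ih =>
    simp only [List.cons_append, pvWriteSeq, ih, List.length_cons]
    congr 1
    push_cast
    ring

theorem pvWriteSeq_eq (vs : List Char) (enc : List Char) (k : Nat)
    (h : k + vs.length ≤ enc.length) :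
    pvWriteSeq enc (k : Int) vs = enc.take k ++ vs ++ enc.drop (k + vs.length) := by
  induction vs generalizing enc k with
  | nil => simp [pvWriteSeq]
  | cons v vs ih =>
    have hk : k < enc.length := by simp at h; omega
    have hset : PySem.List.pySetD enc (k : Int) v = enc.set k v := by
      unfold PySem.List.pySetD
      rw [PySem.List.pySet?_natCast enc k v hk]
      rfl
    have hcast : ((k : Int) + 1) = ((k + 1 : Nat) : Int) := by push_cast; ring
    rw [pvWriteSeq, hset, hcast, ih (enc.set k v) (k + 1) (by simp at h ⊢; omega)]
    rw [List.set_eq_take_append_cons_drop, if_pos hk]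
    have hlen : (List.take k enc).length = k := by simp; omega
    rw [List.take_append, List.drop_append, hlen]
    have e1 : k + 1 - k = 1 := by omega
    have e2 : k + 1 + vs.length - k = vs.length + 1 := by omega
    rw [e1, e2, List.take_take]
    have e3 : min (k + 1) k = k := by omega
    rw [e3]
    rw [List.drop_eq_nil_of_le (as := List.take k enc) (i := k + 1 + vs.length) (by rw [hlen]; omega)]
    simp only [List.take_succ_cons, List.take_zero, List.drop_succ_cons, List.drop_drop,
      List.nil_append, List.cons_append, List.append_assoc, List.length_cons]
    have e4 : k + 1 + vs.length = k + (vs.length + 1) := by omega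
    rw [e4]

theorem pvLoop_eq (f : Int → Char) (js : List Int) (enc : List Char) (ind : Int) :
    js.foldl (fun (st : List Char × Int) j => (PySem.List.pySetD st.1 st.2 (f j), st.2 + 1)) (enc, ind)
      = (pvWriteSeq enc ind (js.map f), ind + js.length) := by
  induction js generalizing enc ind with
  | nil => simp [pvWriteSeq]
  | cons j js ih =>
    simp only [List.foldl_cons, List.map_cons, pvWriteSeq, ih, List.length_cons]
    simp only [Prod.mk.injEq]
    constructor
    · first
      | rfl
      | trivial
    · push_cast
      ring

theorem pvLoop2_eq (w : Int) (g : Int → Int → Char) (is : List Int) (enc : List Char) (ind : Int) :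
    is.foldl
      (fun (st : List Char × Int) i =>
        (PySem.List.pyRange 0 (PySem.Int.floordiv (st.1.length : Int) w)).foldl
          (fun (st : List Char × Int) j => (PySem.List.pySetD st.1 st.2 (g i j), st.2 + 1)) st)
      (enc, ind)
    = (pvWriteSeq enc ind
        ((is.map (fun i => (PySem.List.pyRange 0 (PySem.Int.floordiv (enc.length : Int) w)).map (g i))).flatten),
        ind + is.length * (PySem.List.pyRange 0 (PySem.Int.floordiv (enc.length : Int) w)).length) := by
  induction is generalizing enc ind with
  | nil => simp [pvWriteSeq]
  | cons i is ih =>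
    simp only [List.foldl_cons]
    rw [pvLoop_eq (f := g i)]
    rw [ih]
    simp only [length_pvWriteSeq]
    simp only [List.map_cons, List.flatten_cons, List.length_cons]
    rw [pvWriteSeq_append]
    simp only [List.length_map, Prod.mk.injEq]
    constructor
    · first
      | rfl
      | trivial
    · push_cast
      ring

theorem pvSliceNil (i w : Int) :
    (PySem.List.slice? ([] : List Char) (some i) none w).getD [] = [] := by
  unfold PySem.List.slice?
  by_cases hw : w = 0
  · simp [hw]
  · simp [hw, PySem.List.sliceIndices]

theorem pvCol_eq (s : List Char) (wn r : Nat) (hwn : 1 ≤ wn) (hr : s.length = wn * r)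
    (i : Int) (h0 : 0 ≤ i) (hi : i < (wn : Int)) :
    (PySem.List.slice? s (some i) none (wn : Int)).getD []
      = (PySem.List.pyRange 0 (r : Int)).map (fun j => PySem.List.pyGetD s (i + j * (wn : Int)) '*') := by
  have hw0 : ¬ ((wn : Int) = 0) := by omega
  have hwneg : ¬ ((wn : Int) < 0) := by omega
  have hwpos : (0 : Int) < (wn : Int) := by omega
  rcases Nat.eq_zero_or_pos r with hr0 | hrpos
  · subst hr0
    have hs : s = [] := List.eq_nil_of_length_eq_zero (by omega)
    subst hs
    rw [pvSliceNil]
    have hpr : PySem.List.pyRange 0 ((0 : Nat) : Int) = [] := rfl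
    rw [hpr, List.map_nil]
  · have hLen : ((s.length : Int)) = (wn : Int) * (r : Int) := by push_cast [hr]; ring
    have hsl : 0 < s.length := by rw [hr]; exact Nat.mul_pos (by omega) hrpos
    have hiL : i < (s.length : Int) := by
      rw [hLen]
      nlinarith
    simp only [PySem.List.slice?, PySem.List.sliceIndices, if_neg hw0, if_neg hwneg,
      if_pos hwpos, if_neg h0.not_gt]
    rw [min_eq_left (le_of_lt hiL)]
    rw [if_pos hiL]
    have hcnt : ((s.length : Int) - i + (wn : Int) - 1) / (wn : Int) = (r : Int) := by
      have h1 : ((s.length : Int) - i + (wn : Int) - 1) = ((wn : Int) - 1 - i) + (r : Int) * (wn : Int) := by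
        rw [hLen]; ring
      rw [h1, Int.add_mul_ediv_right _ _ hw0, Int.ediv_eq_zero_of_lt (by omega) (by omega)]
      ring
    rw [hcnt, Int.toNat_natCast]
    have hidx : ∀ k : Nat, k < r → (i + (wn : Int) * (k : Int)).toNat < s.length := by
      intro k hk
      have hk1 : ((k : Int)) ≤ (r : Int) - 1 := by omega
      have hmul : (wn : Int) * (k : Int) ≤ (wn : Int) * ((r : Int) - 1) :=
        mul_le_mul_of_nonneg_left hk1 (by omega)
      have hexp : (wn : Int) * ((r : Int) - 1) = (wn : Int) * (r : Int) - (wn : Int) := by ring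
      have hA : 0 ≤ (wn : Int) * (k : Int) := mul_nonneg (by omega) (by omega)
      have hlt : i + (wn : Int) * (k : Int) < (s.length : Int) := by
        rw [hLen]
        linarith
      omega
    have hcongr : ∀ k ∈ List.range r,
        s[(i + (wn : Int) * (k : Int)).toNat]? = some (s.getD ((i + (wn : Int) * (k : Int)).toNat) '*') := by
      intro k hk
      have hklt := hidx k (List.mem_range.mp hk)
      rw [List.getElem?_eq_getElem hklt, List.getD_eq_getElem?_getD, List.getElem?_eq_getElem hklt]
      rfl
    rw [Option.getD_some, List.filterMap_congr hcongr]
    have hfm : (fun k : Nat => some (s.getD ((i + (wn : Int) * (k : Int)).toNat) '*'))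
        = some ∘ (fun k : Nat => s.getD ((i + (wn : Int) * (k : Int)).toNat) '*') := rfl
    rw [hfm, List.filterMap_eq_map]
    rw [PySem.List.pyRange_zero_natCast r, List.map_map]
    apply List.map_congr_left
    intro k hk
    simp only [Function.comp]
    rw [PySem.List.pyGetD_of_nonneg s '*'
      (add_nonneg h0 (mul_nonneg (Int.natCast_nonneg k) (Int.natCast_nonneg wn)))]
    congr 1
    have hmc : i + (k : Int) * (wn : Int) = i + (wn : Int) * (k : Int) := by ring
    rw [hmc]

theorem pvPad_dvd (s0 : List Char) (w : Int) (hw : 1 ≤ w) :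
    w ∣ (((if PySem.Int.mod (s0.length : Int) w ≠ 0
            then s0 ++ PySem.List.pyRepeat ['*'] (w - PySem.Int.mod (s0.length : Int) w)
            else s0).length : Nat) : Int) := by
  by_cases hm : PySem.Int.mod (s0.length : Int) w = 0
  · rw [if_neg (by simp [hm])]
    exact (PySem.Int.mod_eq_zero_iff_dvd _ _).mp hm
  · rw [if_pos hm]
    have h0 : 0 ≤ PySem.Int.mod (s0.length : Int) w := PySem.Int.mod_nonneg _ (by omega)
    have h1 : PySem.Int.mod (s0.length : Int) w < w := PySem.Int.mod_lt _ (by omega)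
    have hq := PySem.Int.floordiv_mul_add_mod (s0.length : Int) w
    simp only [List.length_append, PySem.List.pyRepeat_singleton, List.length_replicate]
    refine ⟨PySem.Int.floordiv (s0.length : Int) w + 1, ?_⟩
    push_cast [Int.toNat_of_nonneg (by omega : (0:Int) ≤ w - PySem.Int.mod (s0.length : Int) w)]
    linarith

/-- The pair (encoded, ind) after A's nested write loop. -/
def pvAStep (s : List Char) (w : Int) : List Char × Int :=
  (PySem.List.pyRange 0 w).foldl
    (fun (st : List Char × Int) i =>
      (PySem.List.pyRange 0 (PySem.Int.floordiv (st.1.length : Int) w)).foldl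
        (fun (st : List Char × Int) j =>
          (PySem.List.pySetD st.1 st.2 (PySem.List.pyGetD s (i + j * w) '*'), st.2 + 1)) st)
    (s, 0)

theorem pvCore (s : List Char) (w : Int) (hw : 1 ≤ w) (hdvd : w ∣ (s.length : Int)) :
    (PySem.List.pyRange 0 ((pvAStep s w).1.length : Int)).foldl
      (fun acc i => acc ++ [PySem.List.pyGetD (pvAStep s w).1 i '*']) []
    = ((PySem.List.pyRange 0 w).map
        (fun i => (PySem.List.slice? s (some i) none w).getD [])).flatten := by
  unfold pvAStep
  obtain ⟨wn, rfl⟩ : ∃ wn : Nat, w = (wn : Int) := ⟨w.toNat, (Int.toNat_of_nonneg (by omega)).symm⟩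
  have hwn : 1 ≤ wn := by exact_mod_cast hw
  obtain ⟨r, hr⟩ : ∃ r : Nat, s.length = wn * r := by
    obtain ⟨c, hc⟩ := hdvd
    have hc0 : 0 ≤ c := by nlinarith [Int.natCast_nonneg s.length]
    refine ⟨c.toNat, ?_⟩
    have hcc : ((s.length : Int)) = ((wn * c.toNat : Nat) : Int) := by
      push_cast [Int.toNat_of_nonneg hc0]
      linarith
    exact_mod_cast hcc
  have hfd : PySem.Int.floordiv ((s.length : Nat) : Int) ((wn : Nat) : Int) = ((r : Nat) : Int) := by
    rw [PySem.Int.floordiv_natCast, hr, Nat.mul_div_cancel_left r (by omega)]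
  have h2 := pvLoop2_eq ((wn : Nat) : Int)
      (fun i j => PySem.List.pyGetD s (i + j * ((wn : Nat) : Int)) '*')
      (PySem.List.pyRange 0 ((wn : Nat) : Int)) s 0
  rw [h2]
  dsimp only
  simp only [hfd]
  set V := ((PySem.List.pyRange 0 ((wn : Nat) : Int)).map
      (fun i => (PySem.List.pyRange 0 ((r : Nat) : Int)).map
        (fun j => PySem.List.pyGetD s (i + j * ((wn : Nat) : Int)) '*'))).flatten with hV
  have hcol : ∀ i : Int, ((PySem.List.pyRange 0 ((r : Nat) : Int)).map
      (fun j => PySem.List.pyGetD s (i + j * ((wn : Nat) : Int)) '*')).length = r := by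
    intro i
    rw [List.length_map, PySem.List.pyRange_zero_natCast, List.length_map, List.length_range]
  have hVlen : V.length = s.length := by
    rw [hV, List.length_flatten, List.map_map]
    simp only [Function.comp_def]
    rw [List.map_congr_left (fun a _ => hcol a)]
    rw [List.map_const', List.sum_replicate, smul_eq_mul]
    rw [PySem.List.pyRange_zero_natCast, List.length_map, List.length_range, hr]
  have hW : pvWriteSeq s 0 V = V := by
    have h00 : (0 : Int) = ((0 : Nat) : Int) := rfl
    rw [h00, pvWriteSeq_eq V s 0 (by omega)]
    simp [hVlen]
  rw [hW]
  rw [PySem.List.foldl_append_singleton_eq_map]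
  rw [List.nil_append]
  have hlenV : ((V.length : Nat) : Int) = PySem.List.len V := rfl
  rw [hlenV, PySem.List.map_pyGetD_pyRange_zero]
  rw [hV]
  apply congrArg List.flatten
  apply List.map_congr_left
  intro i hi
  rw [PySem.List.mem_pyRange_one] at hi
  exact (pvCol_eq s wn r hwn hr i hi.1 hi.2).symm

-- ===== VERDICT (by name: the statement is the Claim_ definition above) =====
theorem EncodeTableRoutePermutation_spec : Claim_equal_EncodeTableRoutePermutation := by
  intro msg w _ hpre
  have hw : 1 ≤ w := hpre
  show EncodeTableRoutePermutation msg w = EncodeTableRoutePermutation_alt msg w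
  exact congrArg String.ofList
    (pvCore (if PySem.Int.mod ((msg.toList.length : Nat) : Int) w ≠ 0
             then msg.toList ++ PySem.List.pyRepeat ['*'] (w - PySem.Int.mod ((msg.toList.length : Nat) : Int) w)
             else msg.toList) w hw (pvPad_dvd msg.toList w hw))
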